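-- pv_equiv track=rewrite | github.com/YajatKapur16/FinSage | finsage/backend/app/core/document_processor.py | extract_tables_from_text
-- ===== SOURCE A (Python) =====
-- from typing import List, Dict, Any
--
-- def extract_tables_from_text(text: str) -> List[List[str]]:
--     tables = []
--     lines = text.split('\n')
--     current_table = []
--     in_table = False
--
--     for line in lines:
--         if '|' in line or '\t' in line:  # Assume lines with | or tabs are part of a table
--             if not in_table:
--                 in_table = True
--             current_table.append(line.split('|' if '|' in line else '\t'))
--         elif in_table:
--             if current_table:
--                 tables.append(current_table)
--             current_table = []
--             in_table = False
--
--     if current_table:  # Add the last table if exists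
--         tables.append(current_table)
--
--     return tables
-- ===== SOURCE B (Python) =====
-- def extract_tables_from_text(text):
--     lines = text.split('\n')
--     flags = ['|' in l or '\t' in l for l in lines]
--     starts = [i for i, (f, p) in enumerate(zip(flags, [False] + flags)) if f and not p]
--     ends = [i + 1 for i, (f, n) in enumerate(zip(flags, flags[1:] + [False])) if f and not n]
--     return [[l.split('|' if '|' in l else '\t') for l in lines[s:e]]
--             for s, e in zip(starts, ends)]
-- ===== Notes on version B (the rewrite author's own statement) =====
-- stated objective: alternative
-- what changed: Replaces A's single-pass in_table/current_table state machine with staged passes: compute a per-line table flag list, detect run starts/ends by comparing each flag with its shifted neighbour, then slice the line list at those boundary pairs.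
import Mathlib
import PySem

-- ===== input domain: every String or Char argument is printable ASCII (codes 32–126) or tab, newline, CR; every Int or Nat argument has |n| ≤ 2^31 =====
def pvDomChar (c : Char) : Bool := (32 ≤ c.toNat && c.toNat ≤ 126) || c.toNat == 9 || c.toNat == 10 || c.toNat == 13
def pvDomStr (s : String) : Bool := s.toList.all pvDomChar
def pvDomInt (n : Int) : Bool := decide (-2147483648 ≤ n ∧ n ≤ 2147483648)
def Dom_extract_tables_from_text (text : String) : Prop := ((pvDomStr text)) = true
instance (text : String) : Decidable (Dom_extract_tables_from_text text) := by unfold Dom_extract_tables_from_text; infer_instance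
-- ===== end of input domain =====

-- B replaces A's in_table/current_table state machine by staged passes: a flag list,
-- boundary detection by comparing each flag with its shifted neighbour, then slicing
-- (alternative decomposition; same O(n) cost).

-- ===== PORT A =====
-- line.split('|' if '|' in line else '\t')  (separator is nonempty, so split? is always some)
def pvRowOf (line : String) : List String :=
  (PySem.Str.split? line (if PySem.Str.isIn "|" line then "|" else "\t")).getD []

-- A's loop body: state = (tables, current_table, in_table)
def pvStepA (st : List (List (List String)) × List (List String) × Bool) (line : String) :
    List (List (List String)) × List (List String) × Bool :=
  let (tables, current, inT) := st
  if PySem.Str.isIn "|" line || PySem.Str.isIn "\t" line then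
    (tables, current ++ [pvRowOf line], true)
  else if inT then
    ((if current ≠ [] then tables ++ [current] else tables), [], false)
  else
    st

def extract_tables_from_text (text : String) : List (List (List String)) :=
  let lines := (PySem.Str.split? text "\n").getD []
  let st := lines.foldl pvStepA ([], [], false)
  if st.2.1 ≠ [] then st.1 ++ [st.2.1] else st.1

-- ===== PORT B =====
def extract_tables_from_text_alt (text : String) : List (List (List String)) :=
  let lines := (PySem.Str.split? text "\n").getD []
  -- flags = ['|' in l or '\t' in l for l in lines]
  let flags := lines.map (fun l => PySem.Str.isIn "|" l || PySem.Str.isIn "\t" l)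
  -- starts = [i for i, (f, p) in enumerate(zip(flags, [False] + flags)) if f and not p]
  let starts := ((PySem.List.enumerate (flags.zip (false :: flags)) 0).filter
      (fun x => x.2.1 && !x.2.2)).map (fun x => x.1)
  -- ends = [i + 1 for i, (f, n) in enumerate(zip(flags, flags[1:] + [False])) if f and not n]
  let ends := ((PySem.List.enumerate
      (flags.zip (PySem.List.slice flags (some 1) none ++ [false])) 0).filter
      (fun x => x.2.1 && !x.2.2)).map (fun x => x.1 + 1)
  (starts.zip ends).map (fun se =>
    (PySem.List.slice lines (some se.1) (some se.2)).map pvRowOf)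

-- ===== PRECONDITION & SPEC =====
def Spec_extract_tables_from_text (text : String) (out : List (List (List String))) : Prop := out = extract_tables_from_text_alt text
instance (text : String) (out : List (List (List String))) : Decidable (Spec_extract_tables_from_text text out) := by unfold Spec_extract_tables_from_text; infer_instance

-- ===== CLAIM (what is proved, stated in full; the proofs are below) =====
def Claim_equal_extract_tables_from_text : Prop := ∀ (text : String), Dom_extract_tables_from_text text → Spec_extract_tables_from_text text (extract_tables_from_text text)

-- ===== LEMMAS AND PROOFS =====

def pvIsTable (line : String) : Bool :=
  PySem.Str.isIn "|" line || PySem.Str.isIn "\t" line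

-- intermediate description both proofs meet at: maximal runs of table lines
def pvScan : List String → List (List (List String))
  | [] => []
  | l :: rest =>
    if pvIsTable l then
      ((l :: rest.takeWhile pvIsTable).map pvRowOf) :: pvScan (rest.dropWhile pvIsTable)
    else pvScan rest
  termination_by lines => lines.length
  decreasing_by
    · simpa using Nat.lt_succ_of_le (List.length_dropWhile_le pvIsTable rest)
    · simp

-- finalize A's state
def pvFinA (st : List (List (List String)) × List (List String) × Bool) :
    List (List (List String)) :=
  if st.2.1 ≠ [] then st.1 ++ [st.2.1] else st.1

-- A's invariant, both states at once
theorem pvMain (lines : List String) :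
    (∀ tables, pvFinA (lines.foldl pvStepA (tables, [], false)) = tables ++ pvScan lines) ∧
    (∀ tables cur, cur ≠ [] →
      pvFinA (lines.foldl pvStepA (tables, cur, true)) =
        tables ++ ((cur ++ (lines.takeWhile pvIsTable).map pvRowOf)
                    :: pvScan (lines.dropWhile pvIsTable))) := by
  induction lines with
  | nil =>
    constructor
    · intro tables; simp [pvFinA, pvScan]
    · intro tables cur hcur; simp [pvFinA, hcur, pvScan]
  | cons l rest ih =>
    obtain ⟨ih0, ih1⟩ := ih
    by_cases h : pvIsTable l = true
    · have hI : (PySem.Str.isIn "|" l || PySem.Str.isIn "\t" l) = true := h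
      have hs : ∀ tables cur, pvStepA (tables, cur, true) l = (tables, cur ++ [pvRowOf l], true) := by
        intro tables cur; simp only [pvStepA]; rw [if_pos hI]
      have hs0 : ∀ tables, pvStepA (tables, ([] : List (List String)), false) l
          = (tables, [pvRowOf l], true) := by
        intro tables; simp only [pvStepA]; rw [if_pos hI]; simp
      have hscan : pvScan (l :: rest) =
          ((l :: rest.takeWhile pvIsTable).map pvRowOf) :: pvScan (rest.dropWhile pvIsTable) := by
        rw [pvScan, if_pos h]
      constructor
      · intro tables
        rw [List.foldl_cons, hs0, ih1 tables [pvRowOf l] (by simp), hscan]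
        simp
      · intro tables cur hcur
        rw [List.foldl_cons, hs tables cur, ih1 tables (cur ++ [pvRowOf l]) (by simp)]
        rw [List.takeWhile_cons_of_pos h, List.dropWhile_cons_of_pos h]
        simp
    · have hb : pvIsTable l = false := by simpa using h
      have hI : (PySem.Str.isIn "|" l || PySem.Str.isIn "\t" l) = false := hb
      have hnot : ¬ ((PySem.Str.isIn "|" l || PySem.Str.isIn "\t" l) = true) := by
        rw [hI]; simp
      have hskip : pvScan (l :: rest) = pvScan rest := by
        rw [pvScan, if_neg (by rw [hb]; simp)]
      constructor
      · intro tables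
        have hs0 : pvStepA (tables, ([] : List (List String)), false) l = (tables, [], false) := by
          simp only [pvStepA]; rw [if_neg hnot]; simp
        rw [List.foldl_cons, hs0, ih0 tables, hskip]
      · intro tables cur hcur
        have hs : pvStepA (tables, cur, true) l = (tables ++ [cur], [], false) := by
          simp only [pvStepA]; rw [if_neg hnot]; simp [hcur]
        rw [List.foldl_cons, hs, ih0 (tables ++ [cur]),
          List.takeWhile_cons_of_neg (by simp [hb]), List.dropWhile_cons_of_neg (by simp [hb]),
          hskip]
        simp

-- run-start indices of a flag list, given the previous flag p
def pvSx (p : Bool) : List Bool → List Nat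
  | [] => []
  | f :: r => (if f && !p then [0] else []) ++ (pvSx f r).map (· + 1)

-- run-end indices (exclusive) of a flag list
def pvEx : List Bool → List Nat
  | [] => []
  | f :: r => (if f && !(r.headD false) then [1] else []) ++ (pvEx r).map (· + 1)

theorem pvSxHead (p : Bool) (g : List Bool) (h : g.headD false = false) :
    pvSx true g = pvSx p g := by
  cases g with
  | nil => rfl
  | cons f r =>
    simp at h
    simp [pvSx, h]

theorem pvSxRun (m : Nat) (g : List Bool) (h : g.headD false = false) :
    pvSx true (List.replicate m true ++ g) = (pvSx false g).map (· + m) := by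
  induction m with
  | zero => simpa using pvSxHead false g h
  | succ k ih =>
    rw [List.replicate_succ, List.cons_append, pvSx, ih]
    simp [List.map_map]

theorem pvExRun (m : Nat) (g : List Bool) (h : g.headD false = false) :
    pvEx (List.replicate (m + 1) true ++ g) = (m + 1) :: (pvEx g).map (· + (m + 1)) := by
  induction m with
  | zero =>
    cases g with
    | nil => simp [pvEx]
    | cons x xs =>
      simp at h
      simp [pvEx, h]
  | succ k ih =>
    rw [List.replicate_succ, List.cons_append, pvEx, ih]
    have hh : ((List.replicate (k + 1) true ++ g).headD false) = true := by
      simp [List.replicate_succ]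
    rw [hh]
    simp [List.map_map]

-- the starts comprehension of B computes pvSx
theorem pvStartsSpec (flags : List Bool) (p : Bool) (s : Nat) :
    ((PySem.List.enumerate (flags.zip (p :: flags)) (s : Int)).filter
      (fun x => x.2.1 && !x.2.2)).map (fun x => x.1)
    = (pvSx p flags).map (fun n => ((n + s : Nat) : Int)) := by
  induction flags generalizing p s with
  | nil => simp [PySem.List.enumerate_nil, pvSx]
  | cons f r ih =>
    have cast1 : ((s : Int) + 1) = ((s + 1 : Nat) : Int) := by push_cast; ring
    have ih' := ih f (s + 1)
    rw [← cast1] at ih'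
    rw [List.zip_cons_cons, PySem.List.enumerate_cons, List.filter_cons, pvSx]
    by_cases hf : (f && !p) = true
    · simp only [hf, if_true, List.map_cons, ih', List.cons_append, List.nil_append,
        List.map_append, List.map_map]
      refine congrArg₂ List.cons (by push_cast; ring) ?_
      exact List.map_congr_left (fun a _ => by simp only [Function.comp_apply]; push_cast; ring)
    · simp only [Bool.not_eq_true] at hf
      simp only [hf, Bool.false_eq_true, if_false, ih', List.nil_append, List.map_map]
      exact List.map_congr_left (fun a _ => by simp only [Function.comp_apply]; push_cast; ring)

theorem pvZipShift (f : Bool) (r : List Bool) :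
    (f :: r).zip (r ++ [false]) = (f, r.headD false) :: r.zip (r.drop 1 ++ [false]) := by
  cases r with
  | nil => rfl
  | cons g rr => rfl

-- the ends comprehension of B computes pvEx
theorem pvEndsSpec (flags : List Bool) (s : Nat) :
    ((PySem.List.enumerate (flags.zip (flags.drop 1 ++ [false])) (s : Int)).filter
      (fun x => x.2.1 && !x.2.2)).map (fun x => x.1 + 1)
    = (pvEx flags).map (fun n => ((n + s : Nat) : Int)) := by
  induction flags generalizing s with
  | nil => simp [PySem.List.enumerate_nil, pvEx]
  | cons f r ih =>
    have cast1 : ((s : Int) + 1) = ((s + 1 : Nat) : Int) := by push_cast; ring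
    have ih' := ih (s + 1)
    rw [← cast1] at ih'
    have hz : (f :: r).zip ((f :: r).drop 1 ++ [false])
        = (f, r.headD false) :: r.zip (r.drop 1 ++ [false]) := by
      simpa using pvZipShift f r
    rw [hz, PySem.List.enumerate_cons, List.filter_cons, pvEx]
    by_cases hf : (f && !(r.headD false)) = true
    · simp only [hf, if_true, List.map_cons, ih', List.cons_append, List.nil_append,
        List.map_append, List.map_map]
      refine congrArg₂ List.cons (by push_cast; ring) ?_
      exact List.map_congr_left (fun a _ => by simp only [Function.comp_apply]; push_cast; ring)
    · simp only [Bool.not_eq_true] at hf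
      simp only [hf, Bool.false_eq_true, if_false, ih', List.nil_append, List.map_map]
      exact List.map_congr_left (fun a _ => by simp only [Function.comp_apply]; push_cast; ring)

-- B as a pure Nat-indexed slicing function
def pvG (lines : List String) : List (List (List String)) :=
  ((pvSx false (lines.map pvIsTable)).zip (pvEx (lines.map pvIsTable))).map
    (fun se => ((lines.drop se.1).take (se.2 - se.1)).map pvRowOf)

theorem pvHeadDrop (r : List String) :
    ((r.dropWhile pvIsTable).map pvIsTable).headD false = false := by
  induction r with
  | nil => simp
  | cons x xs ih =>
    by_cases h : pvIsTable x = true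
    · rw [List.dropWhile_cons_of_pos h]; exact ih
    · simp only [Bool.not_eq_true] at h
      rw [List.dropWhile_cons_of_neg (by simp [h])]
      simp [h]

theorem pvMapTake (r : List String) :
    (r.takeWhile pvIsTable).map pvIsTable
      = List.replicate (r.takeWhile pvIsTable).length true := by
  have := List.eq_replicate_of_mem (a := true)
    (l := (List.takeWhile pvIsTable r).map pvIsTable)
    (by intro b hb
        obtain ⟨x, hx, rfl⟩ := List.mem_map.mp hb
        exact List.mem_takeWhile_imp hx)
  simpa using this

theorem pvGScan (lines : List String) : pvG lines = pvScan lines := by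
  induction hn : lines.length using Nat.strong_induction_on generalizing lines with
  | _ n ih =>
  cases lines with
  | nil => simp [pvG, pvSx, pvEx, pvScan]
  | cons l r =>
    by_cases h : pvIsTable l = true
    · -- a run of length m+1 starts here
      set t := r.takeWhile pvIsTable with ht
      set d := r.dropWhile pvIsTable with hd
      set m := t.length with hm
      have hr : r = t ++ d := (List.takeWhile_append_dropWhile (p := pvIsTable) (l := r)).symm
      have hflags : (l :: r).map pvIsTable = List.replicate (m + 1) true ++ d.map pvIsTable := by
        rw [List.map_cons, h, hr, List.map_append, pvMapTake, List.replicate_succ, ← ht, ← hm]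
        simp
      have hdh : (d.map pvIsTable).headD false = false := pvHeadDrop r
      have hS : pvSx false ((l :: r).map pvIsTable)
          = 0 :: (pvSx false (d.map pvIsTable)).map (· + (m + 1)) := by
        rw [hflags, List.replicate_succ, List.cons_append, pvSx,
          pvSxRun m (d.map pvIsTable) hdh]
        simp [List.map_map]
      have hE : pvEx ((l :: r).map pvIsTable)
          = (m + 1) :: (pvEx (d.map pvIsTable)).map (· + (m + 1)) := by
        rw [hflags, pvExRun m (d.map pvIsTable) hdh]
      have hdrop : (l :: r).drop (m + 1) = d := by
        rw [List.drop_succ_cons, hr, List.drop_append_of_le_length (by simp [hm]),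
          List.drop_length]
        simp [hm]
      have htake : (l :: r).take (m + 1) = l :: t := by
        rw [List.take_succ_cons, hr, List.take_append_of_le_length (by simp [hm])]
        simp [hm]
      have hlen : d.length < n := by
        rw [← hn]
        simp only [List.length_cons]
        exact Nat.lt_succ_of_le (by rw [hd]; exact List.length_dropWhile_le pvIsTable r)
      have hscan : pvScan (l :: r)
          = ((l :: t).map pvRowOf) :: pvScan d := by
        rw [pvScan, if_pos h, ← ht, ← hd]
      rw [hscan, pvG, hS, hE, List.zip_cons_cons, List.map_cons]
      refine congrArg₂ List.cons ?_ ?_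
      · rw [Nat.sub_zero, List.drop_zero, htake]
      · have hrec : pvG d = pvScan d := ih d.length hlen d rfl
        rw [← hrec, pvG, List.zip_map, List.map_map]
        refine List.map_congr_left (fun a _ => ?_)
        simp only [Function.comp_apply, Prod.map]
        have h1 : (l :: r).drop (a.1 + (m + 1)) = d.drop a.1 := by
          rw [Nat.add_comm, ← List.drop_drop, hdrop]
        have h2 : a.2 + (m + 1) - (a.1 + (m + 1)) = a.2 - a.1 := by omega
        rw [h1, h2]
    · -- non-table head: everything shifts by one
      simp only [Bool.not_eq_true] at h
      have hflags : (l :: r).map pvIsTable = false :: r.map pvIsTable := by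
        rw [List.map_cons, h]
      have hS : pvSx false ((l :: r).map pvIsTable)
          = (pvSx false (r.map pvIsTable)).map (· + 1) := by
        rw [hflags, pvSx]; simp
      have hE : pvEx ((l :: r).map pvIsTable)
          = (pvEx (r.map pvIsTable)).map (· + 1) := by
        cases hg : r.map pvIsTable with
        | nil => rw [hflags, hg]; simp [pvEx]
        | cons g gg => rw [hflags, hg, pvEx]; simp
      have hscan : pvScan (l :: r) = pvScan r := by
        rw [pvScan, if_neg (by simp [h])]
      have hrec : pvG r = pvScan r :=
        ih r.length (by rw [← hn]; simp) r rfl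
      rw [hscan, ← hrec, pvG, pvG, hS, hE, List.zip_map, List.map_map]
      refine List.map_congr_left (fun a _ => ?_)
      simp only [Function.comp_apply, Prod.map]
      rw [List.drop_succ_cons]
      have h2 : a.2 + 1 - (a.1 + 1) = a.2 - a.1 := by omega
      rw [h2]

theorem pvAeq (text : String) :
    extract_tables_from_text text = pvScan ((PySem.Str.split? text "\n").getD []) := by
  unfold extract_tables_from_text
  have := (pvMain ((PySem.Str.split? text "\n").getD [])).1 []
  simpa [pvFinA] using this

theorem pvBeq (text : String) :
    extract_tables_from_text_alt text = pvG ((PySem.Str.split? text "\n").getD []) := by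
  simp only [extract_tables_from_text_alt, pvG]
  set lines := (PySem.Str.split? text "\n").getD [] with hl
  have hfl : lines.map (fun l => PySem.Str.isIn "|" l || PySem.Str.isIn "\t" l)
      = lines.map pvIsTable := rfl
  rw [hfl]
  set flags := lines.map pvIsTable with hf
  have hst := pvStartsSpec flags false 0
  have hen := pvEndsSpec flags 0
  norm_num at hst hen
  rw [PySem.List.slice_from_one, hst, hen, List.zip_map, List.map_map]
  refine List.map_congr_left (fun a _ => ?_)
  simp only [Function.comp_apply, Prod.map]
  rw [PySem.List.slice_natCast]

-- ===== VERDICT (by name: the statement is the Claim_ definition above) =====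
theorem extract_tables_from_text_spec : Claim_equal_extract_tables_from_text := by
  intro text _
  unfold Spec_extract_tables_from_text
  rw [pvAeq, pvBeq, pvGScan]
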